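-- pv_equiv track=rewrite | github.com/daniel-reich/ubiquitous-fiesta | mrrKngM2fqDEDMXtS_23.py | can_patch
-- ===== SOURCE A (Python) =====
-- def can_patch(bridge, planks):
--   holes = []
--   count = 0
--   for i in bridge:
--     if i == 1 and count != 0:
--       holes.append(count)
--       count = 0
--     elif i == 0:
--       count += 1
--   for i in holes:
--     repaired = False
--     for j in planks:
--       if i == j or i == j + 1:
--         repaired = True
--         planks.remove(j)
--         break
--     if not repaired and i != 1:
--       return False
--   return True
-- ===== SOURCE B (Python) =====
-- # Alternative implementation: index plank positions by value once, then answer each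
-- # hole by comparing the earliest remaining position of value h and h-1, instead of
-- # A's per-hole rescan of the plank list. NOTE: A mutates `planks` (removes used
-- # planks); B does not — the equivalence claimed is about the return value only.
-- def can_patch(bridge, planks):
--     pos = {}
--     idx = len(planks) - 1
--     for v in reversed(planks):
--         pos.setdefault(v, []).append(idx)   # each list holds positions in DESCENDING order
--         idx -= 1
--     holes = []
--     count = 0
--     for x in bridge:
--         if x == 1 and count != 0:
--             holes.append(count)
--             count = 0
--         elif x == 0:
--             count += 1
--     for h in holes:
--         la = pos.get(h, [])
--         lb = pos.get(h - 1, [])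
--         if not la and not lb:
--             if h != 1:
--                 return False
--         elif not lb or (la and la[-1] < lb[-1]):
--             la.pop()                        # consume earliest plank of value h
--         else:
--             lb.pop()                        # consume earliest plank of value h-1
--     return True
-- ===== Notes on version B (the rewrite author's own statement) =====
-- stated objective: alternative
-- what changed: Instead of rescanning the plank list for every hole, B builds once a dict mapping each plank value to its positions (kept descending so pop() yields the earliest) and answers each hole by comparing the earliest remaining position of value h and h-1, matching A's first-in-list greedy choice exactly; B does not mutate planks (A removes used planks in place), the return value is identical.
import Mathlib
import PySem

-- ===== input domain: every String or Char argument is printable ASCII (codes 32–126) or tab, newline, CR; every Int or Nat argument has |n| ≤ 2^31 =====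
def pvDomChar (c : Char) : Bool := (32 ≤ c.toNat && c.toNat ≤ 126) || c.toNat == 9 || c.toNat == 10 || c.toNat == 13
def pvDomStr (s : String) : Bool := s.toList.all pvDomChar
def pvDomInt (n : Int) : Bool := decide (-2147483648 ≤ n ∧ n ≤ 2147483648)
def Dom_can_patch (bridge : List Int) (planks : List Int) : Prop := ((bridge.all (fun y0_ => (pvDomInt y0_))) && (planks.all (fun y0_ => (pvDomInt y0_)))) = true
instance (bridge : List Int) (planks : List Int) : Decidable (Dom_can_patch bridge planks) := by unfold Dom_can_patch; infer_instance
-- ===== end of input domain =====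

-- B replaces A's per-hole rescans of the plank list by a one-time index of plank positions
-- by value, per hole comparing the earliest remaining position of value h and h-1; same
-- return value. NOTE: Python A mutates `planks` in place (removes used planks), B does not —
-- the equivalence proved is about the return value only.

-- ===== PORT A =====
-- first loop of A: collect the hole lengths (runs of 0s closed by a 1)
def pvHoles (bridge : List Int) : List Int :=
  (bridge.foldl (fun (s : List Int × Int) i =>
      if i == 1 && !(s.2 == 0) then (s.1 ++ [s.2], 0)
      else if i == 0 then (s.1, s.2 + 1) else s) ([], 0)).1

-- A's inner loop: first plank j with i == j or i == j + 1
def pvScanA (h : Int) : List Int → Option Int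
  | [] => none
  | j :: rest => if h == j || h == j + 1 then some j else pvScanA h rest

-- A's outer loop over the holes, with the (mutated) plank list as state
def pvLoopA : List Int → List Int → Bool
  | [], _ => true
  | h :: rest, pl =>
    match pvScanA h pl with
    | some j => pvLoopA rest ((PySem.List.remove? pl j).getD pl)
    | none => if !(h == 1) then false else pvLoopA rest pl

def can_patch (bridge : List Int) (planks : List Int) : Bool :=
  pvLoopA (pvHoles bridge) planks

-- ===== PORT B =====
-- B's first loop: pos.setdefault(v, []).append(idx) over reversed(planks), idx descending
def pvStepB (s : PySem.Dict Int (List Int) × Int) (v : Int) : PySem.Dict Int (List Int) × Int :=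
  (s.1.insert v (PySem.Dict.getD s.1 v [] ++ [s.2]), s.2 - 1)

def pvBuildPos (planks : List Int) : PySem.Dict Int (List Int) :=
  (planks.reverse.foldl pvStepB (PySem.Dict.empty, (planks.length : Int) - 1)).1

-- B's loop over the holes: compare la[-1] and lb[-1] (the earliest remaining positions)
def pvLoopB : List Int → PySem.Dict Int (List Int) → Bool
  | [], _ => true
  | h :: rest, d =>
    let la := PySem.Dict.getD d h []
    let lb := PySem.Dict.getD d (h - 1) []
    match la.getLast?, lb.getLast? with
    | none, none => if !(h == 1) then false else pvLoopB rest d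
    | some _, none => pvLoopB rest (d.insert h la.dropLast)
    | some x, some y =>
        if x < y then pvLoopB rest (d.insert h la.dropLast)
        else pvLoopB rest (d.insert (h - 1) lb.dropLast)
    | none, some _ => pvLoopB rest (d.insert (h - 1) lb.dropLast)

def can_patch_alt (bridge : List Int) (planks : List Int) : Bool :=
  pvLoopB (pvHoles bridge) (pvBuildPos planks)

-- ===== PRECONDITION & SPEC =====
def Spec_can_patch (bridge : List Int) (planks : List Int) (out : Bool) : Prop := out = can_patch_alt bridge planks
instance (bridge : List Int) (planks : List Int) (out : Bool) : Decidable (Spec_can_patch bridge planks out) := by unfold Spec_can_patch; infer_instance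

-- ===== CLAIM (what is proved, stated in full; the proofs are below) =====
def Claim_equal_can_patch : Prop := ∀ (bridge : List Int) (planks : List Int), Dom_can_patch bridge planks → Spec_can_patch bridge planks (can_patch bridge planks)

-- ===== LEMMAS AND PROOFS =====

-- ghost state: the remaining planks, tagged with their original positions
def pvDval (e : List (Int × Int)) (v : Int) : List Int :=
  ((e.filter (fun p => p.2 == v)).map (·.1)).reverse

def pvAscEnum : List Int → Int → List (Int × Int)
  | [], _ => []
  | x :: xs, i => (i, x) :: pvAscEnum xs (i + 1)

def pvRevEnum : List Int → Int → List (Int × Int)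
  | [], _ => []
  | x :: xs, i => (i, x) :: pvRevEnum xs (i - 1)

theorem pv_map_ascEnum (l : List Int) (i : Int) : (pvAscEnum l i).map (·.2) = l := by
  induction l generalizing i with
  | nil => rfl
  | cons x xs ih => simp [pvAscEnum, ih]

theorem pv_ascEnum_lb (l : List Int) (i : Int) : ∀ p ∈ pvAscEnum l i, i ≤ p.1 := by
  induction l generalizing i with
  | nil => simp [pvAscEnum]
  | cons x xs ih =>
    intro p hp
    simp only [pvAscEnum, List.mem_cons] at hp
    rcases hp with rfl | hp
    · simp
    · have := ih (i + 1) p hp; omega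

theorem pv_ascEnum_pairwise (l : List Int) (i : Int) :
    (pvAscEnum l i).Pairwise (fun p q => p.1 < q.1) := by
  induction l generalizing i with
  | nil => simp [pvAscEnum]
  | cons x xs ih =>
    refine List.Pairwise.cons ?_ (ih (i + 1))
    intro q hq
    have := pv_ascEnum_lb xs (i + 1) q hq
    simp only
    omega

theorem pv_foldl_stepB (l : List Int) (d : PySem.Dict Int (List Int)) (i : Int) (v : Int) :
    PySem.Dict.getD (l.foldl pvStepB (d, i)).1 v [] =
      PySem.Dict.getD d v [] ++ ((pvRevEnum l i).filter (fun p => p.2 == v)).map (·.1) := by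
  induction l generalizing d i with
  | nil => simp [pvRevEnum]
  | cons x xs ih =>
    show PySem.Dict.getD (xs.foldl pvStepB (pvStepB (d, i) x)).1 v [] = _
    rw [pvStepB]
    rw [ih]
    by_cases hxv : x = v
    · subst hxv
      rw [PySem.Dict.getD_insert_self]
      simp [pvRevEnum]
    · rw [PySem.Dict.getD_insert_of_ne d (PySem.Dict.getD d x [] ++ [i]) [] (fun a => hxv a.symm)]
      have h2 : ((x : Int) == v) = false := beq_false_of_ne hxv
      simp [pvRevEnum, List.filter_cons, h2]

theorem pv_revEnum_append (a b : List Int) (i : Int) :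
    pvRevEnum (a ++ b) i = pvRevEnum a i ++ pvRevEnum b (i - a.length) := by
  induction a generalizing i with
  | nil => simp [pvRevEnum]
  | cons x xs ih =>
    simp only [List.cons_append, pvRevEnum, List.length_cons, ih]
    have : i - 1 - (xs.length : Int) = i - ((xs.length : Int) + 1) := by omega
    rw [this]
    push_cast
    ring_nf

theorem pv_revEnum_reverse (l : List Int) (i : Int) :
    pvRevEnum l.reverse (i + l.length - 1) = (pvAscEnum l i).reverse := by
  induction l generalizing i with
  | nil => simp [pvRevEnum, pvAscEnum]
  | cons x xs ih =>
    simp only [List.reverse_cons, pvAscEnum]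
    rw [pv_revEnum_append]
    have h1 : i + ((x :: xs).length : Int) - 1 = (i + 1) + (xs.length : Int) - 1 := by
      simp; omega
    rw [h1, ih (i + 1)]
    have h2 : (i + 1) + (xs.length : Int) - 1 - (xs.reverse.length : Int) = i := by
      simp; omega
    rw [h2]
    simp [pvRevEnum]

theorem pv_buildPos_getD (planks : List Int) (v : Int) :
    PySem.Dict.getD (pvBuildPos planks) v [] = pvDval (pvAscEnum planks 0) v := by
  unfold pvBuildPos
  rw [pv_foldl_stepB]
  have h0 : ((planks.length : Int) - 1) = 0 + (planks.length : Int) - 1 := by omega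
  rw [h0, pv_revEnum_reverse planks 0]
  simp [pysem, pvDval, List.filter_reverse, List.map_reverse]

theorem pv_scanA_map (h : Int) (e : List (Int × Int)) :
    pvScanA h (e.map (·.2)) = (e.find? (fun p => p.2 == h || p.2 == h - 1)).map (·.2) := by
  induction e with
  | nil => rfl
  | cons p ps ih =>
    have hc : (h == p.2 || h == p.2 + 1) = (p.2 == h || p.2 == h - 1) :=
      Bool.eq_iff_iff.mpr (by simp only [Bool.or_eq_true, beq_iff_eq]; omega)
    simp only [List.map_cons, pvScanA, List.find?_cons, hc]
    cases hcc : (p.2 == h || p.2 == h - 1) with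
    | true => simp
    | false => simpa using ih

theorem pv_head?_filter_find (e : List (Int × Int)) (v : Int) :
    ((e.filter (fun p => p.2 == v)).map (·.1)).head? = (e.find? (fun p => p.2 == v)).map (·.1) := by
  induction e with
  | nil => rfl
  | cons p ps ih =>
    simp only [List.filter_cons, List.find?_cons]
    cases hc : (p.2 == v) with
    | true => simp
    | false => simpa using ih

theorem pv_getLast?_dval (e : List (Int × Int)) (v : Int) :
    (pvDval e v).getLast? = (e.find? (fun p => p.2 == v)).map (·.1) := by
  unfold pvDval
  rw [List.getLast?_reverse]
  exact pv_head?_filter_find e v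

theorem pv_find_or (h : Int) (e : List (Int × Int))
    (hp : e.Pairwise (fun p q => p.1 < q.1)) :
    e.find? (fun p => p.2 == h || p.2 == h - 1) =
      (match e.find? (fun p => p.2 == h), e.find? (fun p => p.2 == h - 1) with
       | none, none => none
       | some pa, none => some pa
       | none, some pb => some pb
       | some pa, some pb => if pa.1 < pb.1 then some pa else some pb) := by
  induction e with
  | nil => rfl
  | cons p ps ih =>
    rcases List.pairwise_cons.mp hp with ⟨hhead, htail⟩
    by_cases hh : p.2 = h
    · have h1 : (p.2 == h) = true := by simp [hh]
      have h2 : (p.2 == h - 1) = false := by simp; omega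
      simp only [List.find?_cons, h1, h2, Bool.true_or]
      cases hfb : ps.find? (fun q => q.2 == h - 1) with
      | none => rfl
      | some pb =>
        have hmem := List.mem_of_find?_eq_some hfb
        have : p.1 < pb.1 := hhead pb hmem
        simp [this]
    · by_cases hh2 : p.2 = h - 1
      · have h1 : (p.2 == h) = false := by simp [hh]
        have h2 : (p.2 == h - 1) = true := by simp [hh2]
        simp only [List.find?_cons, h1, h2, Bool.false_or]
        cases hfa : ps.find? (fun q => q.2 == h) with
        | none => rfl
        | some pa =>
          have hmem := List.mem_of_find?_eq_some hfa
          have hlt : p.1 < pa.1 := hhead pa hmem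
          have : ¬ (pa.1 < p.1) := by omega
          simp [this]
      · have h1 : (p.2 == h) = false := by simp [hh]
        have h2 : (p.2 == h - 1) = false := by simp [hh2]
        simp only [List.find?_cons, h1, h2, Bool.false_or]
        exact ih htail

theorem pv_filter_eraseP_self {α : Type} (p : α → Bool) (e : List α) :
    (e.eraseP p).filter p = (e.filter p).tail := by
  induction e with
  | nil => rfl
  | cons x xs ih =>
    cases hx : p x with
    | true => simp [List.filter_cons, hx]
    | false => simp [List.eraseP_cons, List.filter_cons, hx, ih]

theorem pv_filter_eraseP_ne {α : Type} (p q : α → Bool) (e : List α)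
    (hpq : ∀ x, p x = true → q x = false) :
    (e.eraseP p).filter q = e.filter q := by
  induction e with
  | nil => rfl
  | cons x xs ih =>
    cases hx : p x with
    | true => simp [List.eraseP_cons, List.filter_cons, hx, hpq x hx]
    | false => simp [List.eraseP_cons, List.filter_cons, hx, ih]

theorem pv_map_snd_eraseP (e : List (Int × Int)) (j : Int) :
    (e.eraseP (fun p => p.2 == j)).map (·.2) = (e.map (·.2)).erase j := by
  induction e with
  | nil => rfl
  | cons p ps ih =>
    cases hp : ((p.2 : Int) == j) with
    | true => simp [List.eraseP_cons, List.erase_cons, hp]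
    | false => simp [List.eraseP_cons, List.erase_cons, hp, ih]

theorem pv_dropLast_dval (e : List (Int × Int)) (v : Int) :
    (pvDval e v).dropLast = pvDval (e.eraseP (fun p => p.2 == v)) v := by
  unfold pvDval
  rw [List.dropLast_reverse, ← List.map_tail, ← pv_filter_eraseP_self]

theorem pv_dval_eraseP_ne (e : List (Int × Int)) (v w : Int) (hvw : v ≠ w) :
    pvDval (e.eraseP (fun p => p.2 == w)) v = pvDval e v := by
  unfold pvDval
  rw [pv_filter_eraseP_ne]
  intro x hx
  simp only [beq_iff_eq] at hx
  exact beq_false_of_ne (by omega)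

theorem pv_insert_inv (e : List (Int × Int)) (d : PySem.Dict Int (List Int)) (j : Int)
    (hd : ∀ v, PySem.Dict.getD d v [] = pvDval e v) :
    ∀ v, PySem.Dict.getD (d.insert j (pvDval e j).dropLast) v [] =
      pvDval (e.eraseP (fun p => p.2 == j)) v := by
  intro v
  by_cases hvj : v = j
  · subst hvj
    rw [PySem.Dict.getD_insert_self, pv_dropLast_dval]
  · rw [PySem.Dict.getD_insert_of_ne d (pvDval e j).dropLast [] hvj,
        hd v, pv_dval_eraseP_ne e v j hvj]

-- A removes the first plank of value j; on the ghost state that is eraseP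
theorem pv_removeA (e : List (Int × Int)) (j : Int) (pa : Int × Int)
    (hfa : e.find? (fun p => p.2 == j) = some pa) :
    (PySem.List.remove? (e.map (·.2)) j).getD (e.map (·.2)) =
      (e.eraseP (fun p => p.2 == j)).map (·.2) := by
  have hmem : pa ∈ e := List.mem_of_find?_eq_some hfa
  have hpa : pa.2 = j := by
    have := List.find?_some hfa
    simpa using this
  have hj : j ∈ e.map (·.2) := by
    exact List.mem_map.mpr ⟨pa, hmem, hpa⟩
  rw [PySem.List.remove?_eq_some_erase _ _ hj, Option.getD_some, pv_map_snd_eraseP]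

theorem pv_loop_eq (holes : List Int) : ∀ (e : List (Int × Int)) (d : PySem.Dict Int (List Int)),
    e.Pairwise (fun p q => p.1 < q.1) →
    (∀ v, PySem.Dict.getD d v [] = pvDval e v) →
    pvLoopA holes (e.map (·.2)) = pvLoopB holes d := by
  induction holes with
  | nil => intro e d _ _; rfl
  | cons h rest ih =>
    intro e d hp hd
    have hla : (PySem.Dict.getD d h []).getLast? = (e.find? (fun p => p.2 == h)).map (·.1) := by
      rw [hd h, pv_getLast?_dval]
    have hlb : (PySem.Dict.getD d (h - 1) []).getLast? = (e.find? (fun p => p.2 == h - 1)).map (·.1) := by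
      rw [hd (h - 1), pv_getLast?_dval]
    simp only [pvLoopA, pvLoopB]
    rw [pv_scanA_map, pv_find_or h e hp, hla, hlb]
    rcases hfa : e.find? (fun p => p.2 == h) with _ | pa <;>
      rcases hfb : e.find? (fun p => p.2 == h - 1) with _ | pb
    · -- no plank of value h or h - 1
      rw [hfa, hfb]
      simp only [Option.map_none]
      cases hh : h == 1
      · simp
      · simpa using ih e d hp hd
    · -- only a plank of value h - 1
      have hpb : pb.2 = h - 1 := by simpa using List.find?_some hfb
      rw [hfa, hfb]
      change pvLoopA rest ((PySem.List.remove? (List.map (fun x => x.2) e) pb.2).getD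
        (List.map (fun x => x.2) e)) = _
      rw [hpb, pv_removeA e (h - 1) pb hfb, hd (h - 1)]
      exact ih _ _ (List.Pairwise.eraseP _ hp) (pv_insert_inv e d (h - 1) hd)
    · -- only a plank of value h
      have hpa : pa.2 = h := by simpa using List.find?_some hfa
      rw [hfa, hfb]
      change pvLoopA rest ((PySem.List.remove? (List.map (fun x => x.2) e) pa.2).getD
        (List.map (fun x => x.2) e)) = _
      rw [hpa, pv_removeA e h pa hfa, hd h]
      exact ih _ _ (List.Pairwise.eraseP _ hp) (pv_insert_inv e d h hd)
    · -- both: A takes whichever comes first; B compares the positions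
      have hpa : pa.2 = h := by simpa using List.find?_some hfa
      have hpb : pb.2 = h - 1 := by simpa using List.find?_some hfb
      rw [hfa, hfb]
      change (match Option.map (fun x => x.2) (if pa.1 < pb.1 then some pa else some pb) with
          | some j => pvLoopA rest ((PySem.List.remove? (List.map (fun x => x.2) e) j).getD
              (List.map (fun x => x.2) e))
          | none => if (!h == 1) = true then false else pvLoopA rest (List.map (fun x => x.2) e)) =
        (if pa.1 < pb.1 then pvLoopB rest (d.insert h (PySem.Dict.getD d h []).dropLast)
         else pvLoopB rest (d.insert (h - 1) (PySem.Dict.getD d (h - 1) []).dropLast))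
      by_cases hlt : pa.1 < pb.1
      · rw [if_pos hlt, if_pos hlt]
        change pvLoopA rest ((PySem.List.remove? (List.map (fun x => x.2) e) pa.2).getD
          (List.map (fun x => x.2) e)) = _
        rw [hpa, pv_removeA e h pa hfa, hd h]
        exact ih _ _ (List.Pairwise.eraseP _ hp) (pv_insert_inv e d h hd)
      · rw [if_neg hlt, if_neg hlt]
        change pvLoopA rest ((PySem.List.remove? (List.map (fun x => x.2) e) pb.2).getD
          (List.map (fun x => x.2) e)) = _
        rw [hpb, pv_removeA e (h - 1) pb hfb, hd (h - 1)]
        exact ih _ _ (List.Pairwise.eraseP _ hp) (pv_insert_inv e d (h - 1) hd)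

-- ===== VERDICT (by name: the statement is the Claim_ definition above) =====
theorem can_patch_spec : Claim_equal_can_patch := by
  intro bridge planks _
  unfold Spec_can_patch can_patch can_patch_alt
  have h := pv_loop_eq (pvHoles bridge) (pvAscEnum planks 0) (pvBuildPos planks)
    (pv_ascEnum_pairwise planks 0) (fun v => pv_buildPos_getD planks v)
  rw [pv_map_ascEnum] at h
  exact h
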